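-- pv_equiv track=rewrite | github.com/ErezChamilevsky/ex1 | part2/server.py | resolve_domain
-- ===== SOURCE A (Python) =====
-- def resolve_domain(domain_query, mappings):
--
--     if domain_query in mappings:
--         ip_info, record_type = mappings[domain_query]
--         return f"{domain_query},{ip_info},{record_type}"
--
--     ####### starting adjustment####
--     best_ns_match = None
--     longest_match_length = -1
--
--     # Iterate over all mappings to find the longest matching NS record
--     for domain, (ip_info, record_type) in mappings.items():
--         if record_type == "NS":
--             is_match = False
--             ns_match_domain = ""
--
--             # Case 1: Zone entry starts with a dot (e.g., '.co.il')
--             if domain.startswith("."):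
--                 ns_suffix = domain[1:]
--                 # Check if the query ends with the suffix and is not the suffix itself
--                 if domain_query.endswith(ns_suffix) and domain_query != ns_suffix:
--                     # Ensure the match is a full domain component (e.g., mail.google.co.il matches co.il, but not gco.il)
--                     if domain_query == ns_suffix or domain_query.endswith(
--                         "." + ns_suffix
--                     ):
--                         is_match = True
--                         ns_match_domain = ns_suffix
--
--             # Case 2: Zone entry does not start with a dot (e.g., 'co.il')
--             elif domain_query.endswith("." + domain):
--                 is_match = True
--                 ns_match_domain = domain
--
--             if is_match:
--                 # Check if this is the longest match found so far
--                 current_match_length = len(ns_match_domain)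
--                 if current_match_length > longest_match_length:
--                     longest_match_length = current_match_length
--                     # Store the information for the longest match
--                     response_domain = ns_match_domain + "."
--                     best_ns_match = f"{response_domain},{ip_info},{record_type}"
--
--     # If a valid NS match was found, return the result for the longest one
--     if best_ns_match:
--         return best_ns_match
--
--     ##### ending adjustment ####
--     return "non-existent domain"
-- ===== SOURCE B (Python) =====
-- def resolve_domain(domain_query, mappings):
--     if domain_query in mappings:
--         ip_info, record_type = mappings[domain_query]
--         return f"{domain_query},{ip_info},{record_type}"
--
--     # Index every NS record once, keyed by its normalized zone (first entry wins).
--     index = {}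
--     for domain, (ip_info, record_type) in mappings.items():
--         if record_type == "NS":
--             zone = domain[1:] if domain.startswith(".") else domain
--             if zone not in index:
--                 index[zone] = (ip_info, record_type)
--
--     # Probe the query's dot-boundary suffixes, longest first.
--     for i, ch in enumerate(domain_query):
--         if ch == ".":
--             zone = domain_query[i + 1:]
--             if zone in index:
--                 ip_info, record_type = index[zone]
--                 return f"{zone}.,{ip_info},{record_type}"
--     return "non-existent domain"
-- ===== Notes on version B (the rewrite author's own statement) =====
-- stated objective: alternative
-- what changed: Instead of scanning every mapping and keeping the longest matching NS zone with a strict-greater fold, B builds a hash index of NS records keyed by normalized zone and probes the query's dot-boundary suffixes longest-first, returning on the first index hit.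
import Mathlib
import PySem

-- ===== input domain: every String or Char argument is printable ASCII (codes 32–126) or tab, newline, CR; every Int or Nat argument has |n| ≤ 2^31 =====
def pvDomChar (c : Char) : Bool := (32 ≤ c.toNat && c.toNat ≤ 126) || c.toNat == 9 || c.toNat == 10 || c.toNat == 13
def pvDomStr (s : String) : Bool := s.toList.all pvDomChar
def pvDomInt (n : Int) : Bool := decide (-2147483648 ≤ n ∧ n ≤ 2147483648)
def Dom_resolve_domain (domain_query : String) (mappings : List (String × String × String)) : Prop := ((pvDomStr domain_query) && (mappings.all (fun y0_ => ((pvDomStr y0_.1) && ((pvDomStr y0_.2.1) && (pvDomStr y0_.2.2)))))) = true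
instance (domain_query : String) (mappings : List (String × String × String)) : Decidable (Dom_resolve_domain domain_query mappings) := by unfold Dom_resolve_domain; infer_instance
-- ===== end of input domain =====

-- B replaces A's scan over all mappings (strict-longest fold) by an index of NS zones
-- probed with the query's dot-boundary suffixes longest-first; same return value, alternative algorithm.

-- ===== PORT A =====
-- loop body of A's "for domain, (ip_info, record_type) in mappings.items()", state = (best_ns_match, longest_match_length)
def pvAStep (domain_query : String) (st : Option String × Int) (p : String × String × String) :
    Option String × Int :=
  if p.2.2 == "NS" then
    -- (is_match, ns_match_domain), assigned exactly as in A
    let im : Bool × String :=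
      if PySem.Str.startswith p.1 "." then
        let ns_suffix := PySem.Str.slice p.1 (some 1) none
        if PySem.Str.endswith domain_query ns_suffix && !(domain_query == ns_suffix) then
          if domain_query == ns_suffix || PySem.Str.endswith domain_query ("." ++ ns_suffix) then
            (true, ns_suffix)
          else (false, "")
        else (false, "")
      else if PySem.Str.endswith domain_query ("." ++ p.1) then (true, p.1)
      else (false, "")
    if im.1 then
      if ((PySem.Str.len im.2 : Int) > st.2) then
        (some ((im.2 ++ ".") ++ "," ++ p.2.1 ++ "," ++ p.2.2), (PySem.Str.len im.2 : Int))
      else st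
    else st
  else st

-- best_ns_match = None; longest_match_length = -1; the whole loop
def pvABest (domain_query : String) (M : List (String × String × String)) : Option String × Int :=
  M.foldl (pvAStep domain_query) (none, -1)

def resolve_domain (domain_query : String) (mappings : List (String × String × String)) : String :=
  match (PySem.Dict.ofList mappings).get? domain_query with
  | some (ip_info, record_type) => domain_query ++ "," ++ ip_info ++ "," ++ record_type
  | none =>
    match (pvABest domain_query (PySem.Dict.ofList mappings).items).1 with
    | some s => if !(s == "") then s else "non-existent domain"   -- "if best_ns_match:" (string truthiness)
    | none => "non-existent domain"

-- ===== PORT B =====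
-- zone = domain[1:] if domain.startswith('.') else domain
def pvZone (domain : String) : String :=
  if PySem.Str.startswith domain "." then PySem.Str.slice domain (some 1) none else domain

-- index-building loop: keep the first NS entry per normalized zone
def pvBStep (ix : PySem.Dict String (String × String)) (p : String × String × String) :
    PySem.Dict String (String × String) :=
  if p.2.2 == "NS" then
    if ix.contains (pvZone p.1) then ix else ix.insert (pvZone p.1) p.2
  else ix

def pvBIndex (M : List (String × String × String)) : PySem.Dict String (String × String) :=
  M.foldl pvBStep PySem.Dict.empty

-- for i, ch in enumerate(domain_query): if ch == '.': probe domain_query[i+1:]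
def pvScanB (domain_query : String) (index : PySem.Dict String (String × String)) :
    List (Int × Char) → String
  | [] => "non-existent domain"
  | (i, ch) :: rest =>
    if ch == '.' then
      let zone := PySem.Str.slice domain_query (some (i + 1)) none
      match index.get? zone with
      | some (ip_info, record_type) => zone ++ ".," ++ ip_info ++ "," ++ record_type
      | none => pvScanB domain_query index rest
    else pvScanB domain_query index rest

def resolve_domain_alt (domain_query : String) (mappings : List (String × String × String)) : String :=
  match (PySem.Dict.ofList mappings).get? domain_query with
  | some (ip_info, record_type) => domain_query ++ "," ++ ip_info ++ "," ++ record_type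
  | none =>
    pvScanB domain_query (pvBIndex (PySem.Dict.ofList mappings).items)
      (PySem.List.enumerate domain_query.toList 0)

-- ===== PRECONDITION & SPEC =====
def Spec_resolve_domain (domain_query : String) (mappings : List (String × String × String)) (out : String) : Prop := out = resolve_domain_alt domain_query mappings
instance (domain_query : String) (mappings : List (String × String × String)) (out : String) : Decidable (Spec_resolve_domain domain_query mappings out) := by unfold Spec_resolve_domain; infer_instance

-- ===== CLAIM (what is proved, stated in full; the proofs are below) =====
def Claim_equal_resolve_domain : Prop := ∀ (domain_query : String) (mappings : List (String × String × String)), Dom_resolve_domain domain_query mappings → Spec_resolve_domain domain_query mappings (resolve_domain domain_query mappings)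

-- ===== LEMMAS AND PROOFS =====

-- does zone z match query q on a dot boundary (proper suffix)?
def pvMatch (q z : String) : Bool := PySem.Str.endswith q ("." ++ z)

-- the NS items whose normalized zone matches q, tagged with the zone
def pvCands (q : String) (M : List (String × String × String)) : List (String × String × String) :=
  M.filterMap (fun p => if p.2.2 == "NS" && pvMatch q (pvZone p.1) then some (pvZone p.1, p.2) else none)

def pvFmt (e : String × String × String) : String :=
  (e.1 ++ ".") ++ "," ++ e.2.1 ++ "," ++ e.2.2

def pvStep (st : Option String × Int) (e : String × String × String) : Option String × Int :=
  if ((PySem.Str.len e.1 : Int) > st.2) then (some (pvFmt e), (PySem.Str.len e.1 : Int)) else st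

-- probe a list of zones against the index, first hit wins
def pvProbe (ix : PySem.Dict String (String × String)) : List String → Option String
  | [] => none
  | z :: zs =>
    match ix.get? z with
    | some (ip, rt) => some (z ++ ".," ++ ip ++ "," ++ rt)
    | none => pvProbe ix zs

-- abstract probe against the candidate list
def pvProbeC (C : List (String × String × String)) : List String → Option String
  | [] => none
  | z :: zs =>
    match C.find? (fun e => e.1 == z) with
    | some e => some (pvFmt e)
    | none => pvProbeC C zs

-- the zones scanned by B, longest first
def pvZones (q : String) (ps : List (Int × Char)) : List String :=
  ps.filterMap (fun ic => if ic.2 == '.' then some (PySem.Str.slice q (some (ic.1 + 1)) none) else none)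


theorem pv_bool_false {b : Bool} (h : ¬ b = true) : b = false := by
  cases b
  · rfl
  · exact absurd rfl h

theorem pvZones_cons_neg (q : String) (i : Int) (ch : Char) (rest : List (Int × Char))
    (h : (ch == '.') = false) : pvZones q ((i, ch) :: rest) = pvZones q rest := by
  unfold pvZones
  apply List.filterMap_cons_none
  dsimp only
  rw [h]
  rfl

theorem pvZones_cons_pos (q : String) (i : Int) (ch : Char) (rest : List (Int × Char))
    (h : (ch == '.') = true) :
    pvZones q ((i, ch) :: rest)
      = PySem.Str.slice q (some (i + 1)) none :: pvZones q rest := by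
  unfold pvZones
  apply List.filterMap_cons_some
  dsimp only
  rw [h]
  rfl

theorem pv_fmt_eq (z ip rt : String) : pvFmt (z, ip, rt) = z ++ ".," ++ ip ++ "," ++ rt := by
  apply String.toList_injective
  simp [pvFmt]

theorem pv_fmt_ne_empty (e : String × String × String) : (pvFmt e == "") = false := by
  rw [beq_eq_false_iff_ne]
  intro h
  have := congrArg String.toList h
  simp [pvFmt] at this

-- A's dotted-zone test collapses to "query ends with '.' + zone"
theorem pv_dotted_iff (q ns : String) :
    (PySem.Str.endswith q ns && !(q == ns) &&
      (q == ns || PySem.Str.endswith q ("." ++ ns))) = PySem.Str.endswith q ("." ++ ns) := by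
  by_cases h : PySem.Str.endswith q ("." ++ ns) = true
  · have hsuf : ('.' :: ns.toList) <:+ q.toList := by
      rw [PySem.Str.endswith_eq, PySem.Chars.endswith_iff] at h
      simpa using h
    have h1 : PySem.Str.endswith q ns = true := by
      rw [PySem.Str.endswith_eq, PySem.Chars.endswith_iff]
      obtain ⟨t, ht⟩ := hsuf
      exact ⟨t ++ ['.'], by simpa using ht⟩
    have h2 : (q == ns) = false := by
      rw [beq_eq_false_iff_ne]
      rintro rfl
      have := hsuf.length_le
      simp at this
    rw [h, h1, h2]
    simp
  · have hb : PySem.Str.endswith q ("." ++ ns) = false := by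
      simpa using h
    rw [hb]
    by_cases he : (q == ns) = true
    · rw [he]; simp
    · have he' : (q == ns) = false := by simpa using he
      rw [he']; simp

-- each A loop step is the strict-longest step over the candidate form
theorem pv_astep (q : String) (st : Option String × Int) (p : String × String × String) :
    pvAStep q st p =
      if p.2.2 == "NS" && pvMatch q (pvZone p.1) then pvStep st (pvZone p.1, p.2) else st := by
  unfold pvAStep
  by_cases hrt : (p.2.2 == "NS") = true
  · rw [if_pos hrt]
    dsimp only
    by_cases hdot : (PySem.Str.startswith p.1 ".") = true
    · rw [if_pos hdot]
      have hz : pvZone p.1 = PySem.Str.slice p.1 (some 1) none := by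
        unfold pvZone; rw [if_pos hdot]
      by_cases he1 : (PySem.Str.endswith q (PySem.Str.slice p.1 (some 1) none) &&
          !(q == PySem.Str.slice p.1 (some 1) none)) = true
      · rw [if_pos he1]
        by_cases he2 : (q == PySem.Str.slice p.1 (some 1) none ||
            PySem.Str.endswith q ("." ++ PySem.Str.slice p.1 (some 1) none)) = true
        · rw [if_pos he2]
          have hm : pvMatch q (pvZone p.1) = true := by
            unfold pvMatch
            rw [hz, ← pv_dotted_iff, he1, he2]
            rfl
          dsimp only
          rw [if_pos rfl, if_pos (show (p.2.2 == "NS" && pvMatch q (pvZone p.1)) = true by rw [hrt, hm]; rfl)]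
          unfold pvStep pvFmt
          dsimp only
          rw [hz]
        · rw [if_neg he2]
          have hm : pvMatch q (pvZone p.1) = false := by
            unfold pvMatch
            rw [hz, ← pv_dotted_iff, he1, pv_bool_false he2, Bool.and_false]
          dsimp only
          rw [if_neg Bool.false_ne_true, if_neg (show ¬((p.2.2 == "NS" && pvMatch q (pvZone p.1)) = true) by rw [hrt, hm]; exact Bool.false_ne_true)]
      · rw [if_neg he1]
        have hm : pvMatch q (pvZone p.1) = false := by
          unfold pvMatch
          rw [hz, ← pv_dotted_iff, pv_bool_false he1, Bool.false_and]
        dsimp only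
        rw [if_neg Bool.false_ne_true, if_neg (show ¬((p.2.2 == "NS" && pvMatch q (pvZone p.1)) = true) by rw [hrt, hm]; exact Bool.false_ne_true)]
    · rw [if_neg hdot]
      have hz : pvZone p.1 = p.1 := by
        unfold pvZone; rw [if_neg hdot]
      by_cases hm2 : (PySem.Str.endswith q ("." ++ p.1)) = true
      · rw [if_pos hm2]
        have hm : pvMatch q (pvZone p.1) = true := by
          unfold pvMatch; rw [hz]; exact hm2
        dsimp only
        rw [if_pos rfl, if_pos (show (p.2.2 == "NS" && pvMatch q (pvZone p.1)) = true by rw [hrt, hm]; rfl)]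
        unfold pvStep pvFmt
        dsimp only
        rw [hz]
      · rw [if_neg hm2]
        have hm : pvMatch q (pvZone p.1) = false := by
          unfold pvMatch; rw [hz]; exact pv_bool_false hm2
        dsimp only
        rw [if_neg Bool.false_ne_true, if_neg (show ¬((p.2.2 == "NS" && pvMatch q (pvZone p.1)) = true) by rw [hrt, hm]; exact Bool.false_ne_true)]
  · rw [if_neg hrt]
    rw [if_neg (show ¬((p.2.2 == "NS" && pvMatch q (pvZone p.1)) = true) by
      rw [pv_bool_false hrt]; exact Bool.false_ne_true)]

-- A's fold is the strict-longest fold over the candidate list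
theorem pv_afold (q : String) (M : List (String × String × String)) (st : Option String × Int) :
    M.foldl (pvAStep q) st = (pvCands q M).foldl pvStep st := by
  induction M generalizing st with
  | nil => rfl
  | cons p M ih =>
    rw [List.foldl_cons, pv_astep]
    cases hc : (p.2.2 == "NS" && pvMatch q (pvZone p.1)) with
    | false =>
      rw [if_neg Bool.false_ne_true]
      have h1 : pvCands q (p :: M) = pvCands q M := by
        unfold pvCands
        apply List.filterMap_cons_none
        rw [hc]
        rfl
      rw [h1]
      exact ih st
    | true =>
      rw [if_pos rfl]
      have h1 : pvCands q (p :: M) = (pvZone p.1, p.2) :: pvCands q M := by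
        unfold pvCands
        apply List.filterMap_cons_some
        rw [hc]
        rfl
      rw [h1, List.foldl_cons]
      exact ih (pvStep st (pvZone p.1, p.2))

-- B's index lookup is "first NS item with this zone"
theorem pv_index_get (M : List (String × String × String))
    (acc : PySem.Dict String (String × String)) (z : String) :
    (M.foldl pvBStep acc).get? z
      = (acc.get? z).or ((M.find? (fun p => p.2.2 == "NS" && pvZone p.1 == z)).map (·.2)) := by
  induction M generalizing acc with
  | nil => simp
  | cons p M ih =>
    rw [List.foldl_cons]
    cases hns : (p.2.2 == "NS") with
    | false =>
      have hstep : pvBStep acc p = acc := by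
        unfold pvBStep; rw [if_neg (by rw [hns]; exact Bool.false_ne_true)]
      rw [hstep, ih, List.find?_cons_of_neg (by simp [hns])]
    | true =>
      by_cases hz : pvZone p.1 = z
      · subst hz
        rw [List.find?_cons_of_pos (by simp [hns])]
        by_cases hcont : acc.contains (pvZone p.1) = true
        · have hstep : pvBStep acc p = acc := by
            unfold pvBStep; rw [if_pos hns, if_pos hcont]
          rw [hstep, ih]
          rw [PySem.Dict.contains_eq_isSome_get?] at hcont
          cases hg : acc.get? (pvZone p.1) with
          | none => rw [hg] at hcont; simp at hcont
          | some v => rfl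
        · have hcont' : acc.contains (pvZone p.1) = false := pv_bool_false hcont
          have hstep : pvBStep acc p = acc.insert (pvZone p.1) p.2 := by
            unfold pvBStep
            rw [if_pos hns, if_neg (by rw [hcont']; exact Bool.false_ne_true)]
          rw [hstep, ih]
          have hg : acc.get? (pvZone p.1) = none := by
            rw [PySem.Dict.contains_eq_isSome_get?] at hcont'
            cases hg : acc.get? (pvZone p.1) with
            | none => rfl
            | some v => rw [hg] at hcont'; simp at hcont'
          rw [PySem.Dict.get?_insert_self, hg]
          rfl
      · rw [List.find?_cons_of_neg (by simp [hz])]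
        by_cases hcont : acc.contains (pvZone p.1) = true
        · have hstep : pvBStep acc p = acc := by
            unfold pvBStep; rw [if_pos hns, if_pos hcont]
          rw [hstep, ih]
        · have hcont' : acc.contains (pvZone p.1) = false := pv_bool_false hcont
          have hstep : pvBStep acc p = acc.insert (pvZone p.1) p.2 := by
            unfold pvBStep
            rw [if_pos hns, if_neg (by rw [hcont']; exact Bool.false_ne_true)]
          rw [hstep, ih, PySem.Dict.get?_insert_of_ne acc p.2 (Ne.symm hz)]

-- B's scan is pvProbe over pvZones
theorem pv_scan_eq (q : String) (ix : PySem.Dict String (String × String))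
    (ps : List (Int × Char)) :
    pvScanB q ix ps = (pvProbe ix (pvZones q ps)).getD "non-existent domain" := by
  induction ps with
  | nil => rfl
  | cons ic rest ih =>
    obtain ⟨i, ch⟩ := ic
    cases hch : (ch == '.') with
    | false =>
      simp only [pvScanB]
      rw [if_neg (show ¬((ch == '.') = true) by rw [hch]; exact Bool.false_ne_true),
        pvZones_cons_neg _ _ _ _ hch]
      exact ih
    | true =>
      simp only [pvScanB]
      rw [if_pos hch, pvZones_cons_pos _ _ _ _ hch]
      cases hg : ix.get? (PySem.Str.slice q (some (i + 1)) none) with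
      | none =>
        simp only [pvProbe, hg]
        exact ih
      | some pr =>
        obtain ⟨ip, rt⟩ := pr
        simp only [pvProbe, hg, Option.getD_some]

-- every zone produced by the scan is a dot-boundary suffix slice of q
theorem pv_zones_spec (q : String) (L' : List Char) (s : Nat) (z : String)
    (h : z ∈ pvZones q (PySem.List.enumerate L' (s : Int))) :
    ∃ (k : Nat) (hk : k < L'.length), L'[k] = '.' ∧ z.toList = q.toList.drop (s + k + 1) := by
  rw [pvZones] at h
  rcases List.mem_filterMap.mp h with ⟨ic, hmem, hic⟩
  rcases (PySem.List.mem_enumerate_iff _ _ _).mp hmem with ⟨k, hk, rfl⟩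
  dsimp only at hic
  cases hdot : (L'[k] == '.') with
  | false =>
    rw [hdot, if_neg Bool.false_ne_true] at hic
    simp at hic
  | true =>
    rw [hdot, if_pos rfl] at hic
    refine ⟨k, hk, beq_iff_eq.mp hdot, ?_⟩
    have hcast : ((s : Int) + (k : Int) + 1) = ((s + k + 1 : Nat) : Int) := by push_cast; ring
    rw [← Option.some.inj hic, PySem.Str.toList_slice, PySem.Chars.slice_eq_listSlice, hcast,
      PySem.List.slice_from _ (Int.natCast_nonneg _), Int.toNat_natCast]

-- membership in the scanned zones ↔ matching
theorem pv_zones_mem (q z : String) :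
    z ∈ pvZones q (PySem.List.enumerate q.toList 0) ↔ pvMatch q z = true := by
  constructor
  · intro h
    have h' : z ∈ pvZones q (PySem.List.enumerate q.toList ((0 : Nat) : Int)) := by
      simpa using h
    obtain ⟨k, hk, hdot, hz⟩ := pv_zones_spec q q.toList 0 z h'
    rw [pvMatch, PySem.Str.endswith_eq, PySem.Chars.endswith_iff]
    have hdrop : q.toList.drop k = '.' :: q.toList.drop (k + 1) := by
      rw [List.drop_eq_getElem_cons hk, hdot]
    have hsfx : ('.' :: z.toList) <:+ q.toList := by
      rw [hz]
      have h0 : (0 : Nat) + k + 1 = k + 1 := by omega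
      rw [h0, ← hdrop]
      exact List.drop_suffix k q.toList
    simpa using hsfx
  · intro h
    rw [pvMatch, PySem.Str.endswith_eq, PySem.Chars.endswith_iff] at h
    have h2 : ('.' :: z.toList) <:+ q.toList := by simpa using h
    obtain ⟨t, ht⟩ := h2
    have hlen : t.length < q.toList.length := by
      have := congrArg List.length ht
      rw [List.length_append, List.length_cons] at this
      omega
    rw [pvZones]
    refine List.mem_filterMap.mpr ⟨((t.length : Int), '.'), ?_, ?_⟩
    · apply (PySem.List.mem_enumerate_iff _ _ _).mpr
      refine ⟨t.length, hlen, ?_⟩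
      have hget : q.toList[t.length]'hlen = '.' := by
        rw [List.getElem_of_eq ht.symm hlen, List.getElem_append_right (le_refl t.length)]
        simp
      simp [hget]
    · dsimp only
      rw [beq_self_eq_true, if_pos rfl]
      congr 1
      apply String.toList_injective
      have hcast : ((t.length : Int) + 1) = ((t.length + 1 : Nat) : Int) := by push_cast; ring
      rw [PySem.Str.toList_slice, PySem.Chars.slice_eq_listSlice, hcast,
        PySem.List.slice_from _ (Int.natCast_nonneg _), Int.toNat_natCast, ← ht]
      rw [show t ++ '.' :: z.toList = (t ++ ['.']) ++ z.toList by simp,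
        show t.length + 1 = (t ++ ['.']).length by simp, List.drop_left]

-- scanned zones have strictly decreasing lengths
theorem pv_zones_pairwise_aux (q : String) (L' : List Char) (s : Nat)
    (hb : s + L'.length ≤ q.toList.length) :
    (pvZones q (PySem.List.enumerate L' (s : Int))).Pairwise
      (fun a b => PySem.Str.len b < PySem.Str.len a) := by
  induction L' generalizing s with
  | nil =>
    rw [PySem.List.enumerate_nil]
    simp [pvZones]
  | cons c L'' ih =>
    rw [PySem.List.enumerate_cons]
    have hcast : (s : Int) + 1 = ((s + 1 : Nat) : Int) := by push_cast; ring
    have hb' : (s + 1) + L''.length ≤ q.toList.length := by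
      simp only [List.length_cons] at hb; omega
    cases hc : (c == '.') with
    | false =>
      rw [pvZones_cons_neg _ _ _ _ hc, hcast]
      exact ih (s + 1) hb'
    | true =>
      rw [pvZones_cons_pos _ _ _ _ hc, hcast, List.pairwise_cons]
      constructor
      · intro b hbmem
        obtain ⟨k, hk, _, hbl⟩ := pv_zones_spec q L'' (s + 1) b hbmem
        have hlb : PySem.Str.len b = ((q.toList.length - (s + 1 + k + 1) : Nat) : Int) := by
          rw [PySem.Str.len_eq, hbl, List.length_drop]
        have hl0 : PySem.Str.len (PySem.Str.slice q (some ((s + 1 : Nat) : Int)) none)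
            = ((q.toList.length - (s + 1) : Nat) : Int) := by
          rw [PySem.Str.len_eq, PySem.Str.toList_slice, PySem.Chars.slice_eq_listSlice,
            PySem.List.slice_from _ (Int.natCast_nonneg _), Int.toNat_natCast, List.length_drop]
        rw [hlb, hl0]
        omega
      · exact ih (s + 1) hb'

theorem pv_zones_pairwise (q : String) :
    (pvZones q (PySem.List.enumerate q.toList 0)).Pairwise
      (fun a b => PySem.Str.len b < PySem.Str.len a) := by
  have := pv_zones_pairwise_aux q q.toList 0 (by simp)
  simpa using this

-- the strict-longest fold keeps a state no candidate can beat
theorem pv_fold_keep (C : List (String × String × String)) (st : Option String × Int)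
    (h : ∀ e ∈ C, PySem.Str.len e.1 ≤ st.2) : C.foldl pvStep st = st := by
  induction C with
  | nil => rfl
  | cons c C ih =>
    rw [List.foldl_cons]
    have hc := h c List.mem_cons_self
    have hstep : pvStep st c = st := by
      unfold pvStep
      rw [if_neg (by omega)]
    rw [hstep]
    exact ih (fun e he => h e (List.mem_cons_of_mem _ he))

-- the strict-longest fold returns the first candidate carrying the maximal zone
theorem pv_fold_max (C : List (String × String × String)) (z : String)
    (e₀ : String × String × String) (st : Option String × Int)
    (hst : st.2 < PySem.Str.len z)
    (hC : ∀ e ∈ C, e.1 = z ∨ PySem.Str.len e.1 < PySem.Str.len z)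
    (hfind : C.find? (fun e => e.1 == z) = some e₀) :
    (C.foldl pvStep st).1 = some (pvFmt e₀) := by
  induction C generalizing st with
  | nil => simp at hfind
  | cons c C ih =>
    rw [List.foldl_cons]
    by_cases hcz : c.1 = z
    · have hfind' : e₀ = c := by
        rw [List.find?_cons_of_pos (by simp [hcz])] at hfind
        exact (Option.some.inj hfind).symm
      have hlen : st.2 < PySem.Str.len c.1 := by
        rw [hcz]; exact hst
      have hstep : pvStep st c = (some (pvFmt c), PySem.Str.len c.1) := by
        unfold pvStep
        rw [if_pos hlen]
      have hkeep : C.foldl pvStep (some (pvFmt c), PySem.Str.len c.1)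
          = (some (pvFmt c), PySem.Str.len c.1) := by
        apply pv_fold_keep
        intro e he
        dsimp only
        rcases hC e (List.mem_cons_of_mem _ he) with h | h
        · rw [h, hcz]
        · rw [hcz]; omega
      rw [hstep, hkeep, hfind']
    · have hlt : PySem.Str.len c.1 < PySem.Str.len z := by
        rcases hC c List.mem_cons_self with h | h
        · exact absurd h hcz
        · exact h
      rw [List.find?_cons_of_neg (by simp [hcz])] at hfind
      have hst' : (pvStep st c).2 < PySem.Str.len z := by
        unfold pvStep
        split
        · dsimp only; exact hlt
        · exact hst
      exact ih (pvStep st c) hst' (fun e he => hC e (List.mem_cons_of_mem _ he)) hfind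

-- strict-longest fold = longest-first probe, on a decreasing zone list covering all candidates
theorem pv_fold_eq_probeC (C : List (String × String × String)) (zs : List String)
    (hpw : zs.Pairwise (fun a b => PySem.Str.len b < PySem.Str.len a))
    (hcov : ∀ e ∈ C, e.1 ∈ zs) :
    (C.foldl pvStep (none, -1)).1 = pvProbeC C zs := by
  induction zs with
  | nil =>
    cases C with
    | nil => rfl
    | cons c C => exact absurd (hcov c List.mem_cons_self) (List.not_mem_nil)
  | cons z zs ih =>
    rw [List.pairwise_cons] at hpw
    cases hf : C.find? (fun e => e.1 == z) with
    | some e₀ =>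
      simp only [pvProbeC, hf]
      have hst0 : ((none, -1) : Option String × Int).2 < PySem.Str.len z := by
        dsimp only
        rw [PySem.Str.len_eq]
        omega
      apply pv_fold_max C z e₀ (none, -1) hst0 _ hf
      intro e he
      rcases List.mem_cons.mp (hcov e he) with h | h
      · exact Or.inl h
      · exact Or.inr (hpw.1 e.1 h)
    | none =>
      simp only [pvProbeC, hf]
      apply ih hpw.2
      intro e he
      rcases List.mem_cons.mp (hcov e he) with h | h
      · exfalso
        have := List.find?_eq_none.mp hf e he
        simp [h] at this
      · exact h

-- find? on the candidate list, for a matching zone, is find? on the items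
theorem pv_findC (q z : String) (M : List (String × String × String))
    (h : pvMatch q z = true) :
    (pvCands q M).find? (fun e => e.1 == z)
      = (M.find? (fun p => p.2.2 == "NS" && pvZone p.1 == z)).map (fun p => (z, p.2)) := by
  induction M with
  | nil => rfl
  | cons p M ih =>
    cases hns : (p.2.2 == "NS") with
    | false =>
      have h1 : pvCands q (p :: M) = pvCands q M := by
        unfold pvCands
        apply List.filterMap_cons_none
        rw [hns, Bool.false_and]
        rfl
      rw [h1, List.find?_cons_of_neg (by simp [hns]), ih]
    | true =>
      by_cases hz : pvZone p.1 = z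
      · have hm : pvMatch q (pvZone p.1) = true := by rw [hz]; exact h
        have h1 : pvCands q (p :: M) = (pvZone p.1, p.2) :: pvCands q M := by
          unfold pvCands
          apply List.filterMap_cons_some
          rw [hns, hm]
          rfl
        rw [h1, List.find?_cons_of_pos (by simp [hz]),
          List.find?_cons_of_pos (by simp [hns, hz])]
        rw [hz]
        rfl
      · cases hm : pvMatch q (pvZone p.1) with
        | false =>
          have h1 : pvCands q (p :: M) = pvCands q M := by
            unfold pvCands
            apply List.filterMap_cons_none
            rw [hns, hm, Bool.true_and]
            rfl
          rw [h1, List.find?_cons_of_neg (by simp [hz]), ih]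
        | true =>
          have h1 : pvCands q (p :: M) = (pvZone p.1, p.2) :: pvCands q M := by
            unfold pvCands
            apply List.filterMap_cons_some
            rw [hns, hm]
            rfl
          rw [h1, List.find?_cons_of_neg (by simp [hz]),
            List.find?_cons_of_neg (by simp [hz]), ih]

-- probing the index = probing the candidate list, on matching zones
theorem pv_probe_eq (q : String) (M : List (String × String × String)) (zs : List String)
    (hzs : ∀ z ∈ zs, pvMatch q z = true) :
    pvProbe (pvBIndex M) zs = pvProbeC (pvCands q M) zs := by
  induction zs with
  | nil => rfl
  | cons z zs ih =>
    have hg : (pvBIndex M).get? z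
        = (M.find? (fun p => p.2.2 == "NS" && pvZone p.1 == z)).map (·.2) := by
      rw [pvBIndex, pv_index_get]
      simp
    have hfc := pv_findC q z M (hzs z (List.mem_cons_self))
    cases hf : M.find? (fun p => p.2.2 == "NS" && pvZone p.1 == z) with
    | none =>
      rw [hf] at hg hfc
      simp only [Option.map_none] at hg hfc
      simp only [pvProbe, pvProbeC, hg, hfc]
      exact ih (fun z' hz' => hzs z' (List.mem_cons_of_mem _ hz'))
    | some p =>
      rw [hf] at hg hfc
      simp only [Option.map_some] at hg hfc
      simp only [pvProbe, pvProbeC, hg, hfc]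
      rw [pv_fmt_eq]

-- every candidate zone matches
theorem pv_cands_match (q : String) (M : List (String × String × String))
    (e : String × String × String) (h : e ∈ pvCands q M) : pvMatch q e.1 = true := by
  rcases List.mem_filterMap.mp h with ⟨p, _, hp⟩
  split at hp
  · rename_i hc
    rw [Bool.and_eq_true] at hc
    cases hp
    exact hc.2
  · simp at hp

-- a produced best-match string is shaped by pvFmt
theorem pv_probeC_shape (C : List (String × String × String)) (zs : List String) (s : String)
    (h : pvProbeC C zs = some s) : ∃ e, s = pvFmt e := by
  induction zs with
  | nil => simp [pvProbeC] at h
  | cons z zs ih =>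
    rw [pvProbeC] at h
    cases hf : C.find? (fun e => e.1 == z) with
    | some e => rw [hf] at h; exact ⟨e, (Option.some.inj h).symm⟩
    | none => rw [hf] at h; exact ih h

-- ===== VERDICT (by name: the statement is the Claim_ definition above) =====
theorem resolve_domain_spec : Claim_equal_resolve_domain := by
  intro q m _
  show resolve_domain q m = resolve_domain_alt q m
  rw [resolve_domain, resolve_domain_alt]
  cases hget : (PySem.Dict.ofList m).get? q with
  | some pr => obtain ⟨ip, rt⟩ := pr; rfl
  | none =>
    have hA : (pvABest q (PySem.Dict.ofList m).items).1
        = pvProbeC (pvCands q (PySem.Dict.ofList m).items)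
            (pvZones q (PySem.List.enumerate q.toList 0)) := by
      rw [pvABest, pv_afold]
      apply pv_fold_eq_probeC _ _ (pv_zones_pairwise q)
      intro e he
      exact (pv_zones_mem q e.1).mpr (pv_cands_match q _ e he)
    have hB : pvScanB q (pvBIndex (PySem.Dict.ofList m).items)
          (PySem.List.enumerate q.toList 0)
        = (pvProbeC (pvCands q (PySem.Dict.ofList m).items)
            (pvZones q (PySem.List.enumerate q.toList 0))).getD "non-existent domain" := by
      rw [pv_scan_eq, pv_probe_eq]
      intro z hz
      exact (pv_zones_mem q z).mp hz
    rw [hA, hB]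
    cases hp : pvProbeC (pvCands q (PySem.Dict.ofList m).items)
        (pvZones q (PySem.List.enumerate q.toList 0)) with
    | none => rfl
    | some s =>
      obtain ⟨e, rfl⟩ := pv_probeC_shape _ _ _ hp
      simp [pv_fmt_ne_empty]
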